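-- pv_equiv track=rewrite | github.com/datmemerboi/Python-Runs | AnagramFinder.py | countSentences
-- ===== SOURCE A (Python) =====
-- def countSentences(wordSet, sentences):
-- 	intArray = []
-- 	NotHere = True
-- 	for _ in sentences:
-- 		sent = _.split()
-- 		counter = 0
-- 		for i in sent:
-- 			for j in wordSet:
-- 				if(len(i) == len(j)):
-- 					word1 = [word for word in i]
-- 					word2 = [word for word in j]
-- 					for k in word1:
-- 						if(k not in word2):
-- 							NotHere = True
-- 							break
-- 						else:
-- 							NotHere = False
-- 						if(not(NotHere)):
-- 							counter+=1
-- 							break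
-- 		intArray.append(counter)
-- 	return(intArray)
-- ===== SOURCE B (Python) =====
-- def countSentences(wordSet, sentences):
--     table = {}
--     for j in wordSet:
--         for c in set(j):
--             key = (len(j), c)
--             table[key] = table.get(key, 0) + 1
--     return [sum(table.get((len(w), w[0]), 0) for w in s.split()) for s in sentences]
-- ===== Notes on version B (the rewrite author's own statement) =====
-- stated objective: faster
-- what changed: Replaced the per-sentence-word scan over wordSet (whose inner char loop in A always stops at the first character, so a match is just 'same length and first char occurs in the wordSet word') by a precomputed (length, char) -> count table built once from wordSet, giving an O(1) dictionary lookup per sentence word.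
import Mathlib
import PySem

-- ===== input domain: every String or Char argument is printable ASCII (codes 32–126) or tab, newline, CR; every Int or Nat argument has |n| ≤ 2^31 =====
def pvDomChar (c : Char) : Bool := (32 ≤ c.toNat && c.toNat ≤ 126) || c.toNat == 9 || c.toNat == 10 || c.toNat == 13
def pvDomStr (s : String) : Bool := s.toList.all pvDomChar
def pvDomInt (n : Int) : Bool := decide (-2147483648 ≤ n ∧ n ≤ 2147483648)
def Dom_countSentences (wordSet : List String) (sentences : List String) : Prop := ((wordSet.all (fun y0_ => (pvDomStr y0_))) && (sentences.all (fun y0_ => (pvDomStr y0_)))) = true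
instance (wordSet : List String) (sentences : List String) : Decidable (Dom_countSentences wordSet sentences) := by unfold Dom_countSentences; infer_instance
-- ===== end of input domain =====

-- B replaces A's per-word scan over wordSet by a (length, char) -> count table built once; faster.

-- ===== PORT A =====
-- A's 'for k in word1' loop with its two breaks, threading (counter, NotHere)
def pvKLoop : List Char → List Char → Int → Bool → Int × Bool
  | [], _, counter, notHere => (counter, notHere)
  | k :: rest, word2, counter, _ =>
      if ¬ (k ∈ word2) then
        (counter, true)                            -- NotHere = True; break
      else
        let notHere := false                       -- NotHere = False
        if ¬ notHere then (counter + 1, notHere)   -- counter += 1; break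
        else pvKLoop rest word2 counter notHere

def countSentences (wordSet : List String) (sentences : List String) : List Int :=
  let st := sentences.foldl (fun (st : List Int × Bool) s =>
      let sent := PySem.Str.split₀ s
      let r := sent.foldl (fun (p : Int × Bool) i =>
          wordSet.foldl (fun (q : Int × Bool) j =>
              if PySem.Str.len i = PySem.Str.len j then
                pvKLoop i.toList j.toList q.1 q.2
              else q) p) (0, st.2)
      (st.1 ++ [r.1], r.2)) ([], true)
  st.1

-- ===== PORT B =====
-- Source B's 'table': for j in wordSet: for c in set(j): table[(len(j), c)] += 1
def pvTable (wordSet : List String) : PySem.Dict (Int × Char) Int :=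
  wordSet.foldl (fun d j =>
      (PySem.Set.ofList j.toList).foldl
        (fun d c => d.modify (PySem.Str.len j, c) 0 (· + 1)) d)
    PySem.Dict.empty

def countSentences_alt (wordSet : List String) (sentences : List String) : List Int :=
  let table := pvTable wordSet
  sentences.map (fun s =>
    ((PySem.Str.split₀ s).map (fun w =>
        match PySem.Str.pyGet? w 0 with   -- w[0]; words from split() are never empty
        | some c => table.getD (PySem.Str.len w, c) 0
        | none => 0)).sum)

-- ===== PRECONDITION & SPEC =====
def Spec_countSentences (wordSet : List String) (sentences : List String) (out : List Int) : Prop := out = countSentences_alt wordSet sentences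
instance (wordSet : List String) (sentences : List String) (out : List Int) : Decidable (Spec_countSentences wordSet sentences out) := by unfold Spec_countSentences; infer_instance

-- ===== CLAIM (what is proved, stated in full; the proofs are below) =====
def Claim_equal_countSentences : Prop := ∀ (wordSet : List String) (sentences : List String), Dom_countSentences wordSet sentences → Spec_countSentences wordSet sentences (countSentences wordSet sentences)

-- ===== LEMMAS AND PROOFS =====

theorem pv_split₀_go_ne_nil (s : List Char) : ∀ (cur : List Char) (acc : List (List Char)),
    (∀ w ∈ acc, w ≠ []) →
    ∀ w ∈ PySem.Chars.split₀.go s cur acc, w ≠ [] := by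
  induction s with
  | nil =>
    intro cur acc h w hw
    simp only [PySem.Chars.split₀.go] at hw
    split_ifs at hw with hc
    · exact h w (List.mem_reverse.mp hw)
    · rcases List.mem_cons.mp (List.mem_reverse.mp hw) with rfl | hw'
      · simp only [List.isEmpty_iff] at hc
        simpa [List.reverse_eq_nil_iff] using hc
      · exact h w hw'
  | cons c rest ih =>
    intro cur acc h w hw
    simp only [PySem.Chars.split₀.go] at hw
    split_ifs at hw with h1 h2
    · exact ih [] acc h w hw
    · refine ih [] _ ?_ w hw
      intro v hv
      rcases List.mem_cons.mp hv with rfl | hv'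
      · simp only [List.isEmpty_iff] at h2
        simpa [List.reverse_eq_nil_iff] using h2
      · exact h v hv'
    · exact ih (c :: cur) acc h w hw

theorem pv_split₀_ne_nil (s : String) :
    ∀ w ∈ PySem.Str.split₀ s, w.toList ≠ [] := by
  intro w hw
  rcases List.mem_map.mp hw with ⟨l, hl, rfl⟩
  have : (String.ofList l).toList = l := by simp
  rw [this]
  exact pv_split₀_go_ne_nil s.toList [] [] (by simp) l hl

theorem pv_step (j : String) (d : PySem.Dict (Int × Char) Int) (L : Int) (c : Char) :
    ((PySem.Set.ofList j.toList).foldl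
        (fun d c => d.modify (PySem.Str.len j, c) 0 (· + 1)) d).getD (L, c) 0
      = d.getD (L, c) 0 + (if PySem.Str.len j = L ∧ c ∈ j.toList then 1 else 0) := by
  rw [show (PySem.Set.ofList j.toList).foldl
        (fun d c => PySem.Dict.modify d (PySem.Str.len j, c) 0 (· + 1)) d
      = ((PySem.Set.ofList j.toList).map (fun c => (PySem.Str.len j, c))).foldl
        (fun d x => PySem.Dict.modify d x 0 (· + 1)) d from (List.foldl_map (f := fun c => (PySem.Str.len j, c)) (g := fun d x => PySem.Dict.modify d x 0 (· + 1))).symm]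
  rw [PySem.Dict.getD_foldl_modify_add_one]
  by_cases hL : PySem.Str.len j = L
  · subst hL
    rw [show ((PySem.Str.len j, c) : Int × Char) = (fun c => (PySem.Str.len j, c)) c from rfl,
      List.count_map_of_injective _ _ (fun a b h => by simpa using h)]
    by_cases hm : c ∈ j.toList
    · rw [List.count_eq_one_of_mem (PySem.Set.nodup_ofList _) (by simpa [PySem.Set.mem_ofList] using hm)]
      simp [hm]
    · rw [List.count_eq_zero_of_not_mem (by simpa [PySem.Set.mem_ofList] using hm)]
      simp [hm]
  · have hnm : ((L, c) : Int × Char) ∉ (PySem.Set.ofList j.toList).map (fun c => (PySem.Str.len j, c)) := by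
      intro hmem
      rcases List.mem_map.mp hmem with ⟨a, -, ha⟩
      exact hL (congrArg Prod.fst ha)
    rw [List.count_eq_zero_of_not_mem hnm, if_neg (fun h => hL h.1)]
    simp

theorem pv_table_getD (ws : List String) (L : Int) (c : Char) :
    (pvTable ws).getD (L, c) 0
      = (ws.countP (fun j => decide (PySem.Str.len j = L ∧ c ∈ j.toList)) : Int) := by
  suffices h : ∀ d : PySem.Dict (Int × Char) Int,
      (ws.foldl (fun d j =>
        (PySem.Set.ofList j.toList).foldl
          (fun d c => d.modify (PySem.Str.len j, c) 0 (· + 1)) d) d).getD (L, c) 0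
      = d.getD (L, c) 0 + (ws.countP (fun j => decide (PySem.Str.len j = L ∧ c ∈ j.toList)) : Int) by
    simpa [pvTable] using h PySem.Dict.empty
  induction ws with
  | nil => intro d; simp
  | cons j ws ih =>
    intro d
    rw [List.foldl_cons, ih, pv_step, List.countP_cons]
    simp only [PySem.Str.len_eq] at *
    by_cases hp : (j.length : Int) = L ∧ c ∈ j.toList
    · simp [hp]; omega
    · simp [hp]

theorem pv_jloop (ws : List String) (i : String) (k : Char) (t : List Char)
    (hi : i.toList = k :: t) : ∀ (q : Int × Bool),
    (ws.foldl (fun (q : Int × Bool) j =>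
        if PySem.Str.len i = PySem.Str.len j then
          pvKLoop i.toList j.toList q.1 q.2
        else q) q).1
      = q.1 + (ws.countP (fun j => decide (PySem.Str.len j = PySem.Str.len i ∧ k ∈ j.toList)) : Int) := by
  induction ws with
  | nil => intro q; simp
  | cons j ws ih =>
    intro q
    rw [List.foldl_cons, ih, List.countP_cons]
    by_cases hL : PySem.Str.len i = PySem.Str.len j
    · rw [if_pos hL, hi]
      by_cases hm : k ∈ j.toList
      · have hk : pvKLoop (k :: t) j.toList q.1 q.2 = (q.1 + 1, false) := by
          simp [pvKLoop, hm]
        have hL' : i.length = j.length := by simpa [PySem.Str.len_eq] using hL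
        simp [hk, hL', hm]
        omega
      · have hk : pvKLoop (k :: t) j.toList q.1 q.2 = (q.1, true) := by
          simp [pvKLoop, hm]
        simp [hk, hm]
    · rw [if_neg hL]
      have hL' : ¬(j.length = i.length) := fun h => hL (by simp [PySem.Str.len_eq, h])
      simp [hL']

theorem pv_sentence (wordSet : List String) (words : List String)
    (hw : ∀ w ∈ words, w.toList ≠ []) : ∀ (p : Int × Bool),
    (words.foldl (fun (p : Int × Bool) i =>
        wordSet.foldl (fun (q : Int × Bool) j =>
            if PySem.Str.len i = PySem.Str.len j then
              pvKLoop i.toList j.toList q.1 q.2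
            else q) p) p).1
      = p.1 + (words.map (fun w =>
          match PySem.Str.pyGet? w 0 with
          | some c => (pvTable wordSet).getD (PySem.Str.len w, c) 0
          | none => 0)).sum := by
  induction words with
  | nil => intro p; simp
  | cons w rest ih =>
    intro p
    obtain ⟨k, t, hkt⟩ := List.exists_cons_of_ne_nil (hw w (by simp))
    have hg : PySem.Str.pyGet? w 0 = some k := by simp [hkt]
    rw [List.foldl_cons, ih (fun v hv => hw v (List.mem_cons_of_mem _ hv)),
      List.map_cons, List.sum_cons, pv_jloop wordSet w k t hkt p, hg]
    rw [show (match some k with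
        | some c => (pvTable wordSet).getD (PySem.Str.len w, c) 0
        | none => 0) = (pvTable wordSet).getD (PySem.Str.len w, k) 0 from rfl]
    rw [pv_table_getD]
    ring

theorem pv_outer (wordSet : List String) (sentences : List String) :
    ∀ (acc : List Int) (nh : Bool),
    (sentences.foldl (fun (st : List Int × Bool) s =>
        let sent := PySem.Str.split₀ s
        let r := sent.foldl (fun (p : Int × Bool) i =>
            wordSet.foldl (fun (q : Int × Bool) j =>
                if PySem.Str.len i = PySem.Str.len j then
                  pvKLoop i.toList j.toList q.1 q.2
                else q) p) (0, st.2)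
        (st.1 ++ [r.1], r.2)) (acc, nh)).1
      = acc ++ sentences.map (fun s =>
          ((PySem.Str.split₀ s).map (fun w =>
              match PySem.Str.pyGet? w 0 with
              | some c => (pvTable wordSet).getD (PySem.Str.len w, c) 0
              | none => 0)).sum) := by
  induction sentences with
  | nil => intro acc nh; simp
  | cons s rest ih =>
    intro acc nh
    rw [List.foldl_cons]
    simp only []
    rw [ih, List.map_cons]
    rw [pv_sentence wordSet (PySem.Str.split₀ s) (pv_split₀_ne_nil s) (0, nh)]
    simp

-- ===== VERDICT (by name: the statement is the Claim_ definition above) =====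
theorem countSentences_spec : Claim_equal_countSentences := by
  intro wordSet sentences _
  unfold Spec_countSentences countSentences countSentences_alt
  simpa using pv_outer wordSet sentences [] true
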